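-- pv_equiv track=rewrite | github.com/chengt23/ai-skills | patent-disclosure-skill/tools/cnipa_epub_search.py | _terms_from_argv
-- ===== SOURCE A (Python) =====
-- def _terms_from_argv(argv: list[str]) -> list[str]:
--     """从所有 argv 片段中按空白拆分（等价 str.split，连续空格视为一次分隔）。"""
--     terms: list[str] = []
--     for a in argv:
--         for part in (a or "").split():
--             p = part.strip()
--             if p:
--                 terms.append(p)
--     return terms
-- ===== SOURCE B (Python) =====
-- def _terms_from_argv(argv: list[str]) -> list[str]:
--     return " ".join(argv).split()
-- ===== Notes on version B (the rewrite author's own statement) =====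
-- stated objective: simpler
-- what changed: B joins all argv fragments into one space-separated string and tokenizes it with a single split(), replacing A's nested per-fragment split loop with strip and a non-empty guard and an explicit accumulator.
import Mathlib
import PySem

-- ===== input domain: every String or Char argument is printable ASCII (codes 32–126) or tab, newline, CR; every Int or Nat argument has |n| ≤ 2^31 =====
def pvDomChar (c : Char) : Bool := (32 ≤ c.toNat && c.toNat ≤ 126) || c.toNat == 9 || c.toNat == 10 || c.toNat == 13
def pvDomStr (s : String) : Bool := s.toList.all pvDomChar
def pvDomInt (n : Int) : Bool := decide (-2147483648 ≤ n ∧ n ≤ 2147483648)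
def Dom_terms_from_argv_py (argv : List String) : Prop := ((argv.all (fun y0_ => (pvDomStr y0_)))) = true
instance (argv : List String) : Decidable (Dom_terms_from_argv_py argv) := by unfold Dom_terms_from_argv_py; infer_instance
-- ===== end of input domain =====

-- B replaces A's nested per-fragment split/strip/append loops by joining argv with " " and one split(); objective: simpler.

-- ===== PORT A =====
def terms_from_argv_py (argv : List String) : List String :=
  argv.foldl (fun terms a =>
    (PySem.Str.split₀ (if a == "" then "" else a)).foldl (fun terms part =>
      let p := PySem.Str.strip part
      if p ≠ "" then terms ++ [p] else terms) terms) []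

-- ===== PORT B =====
def terms_from_argv_py_alt (argv : List String) : List String :=
  PySem.Str.split₀ (PySem.Str.join " " argv)

-- ===== PRECONDITION & SPEC =====
def Spec_terms_from_argv_py (argv : List String) (out : List String) : Prop := out = terms_from_argv_py_alt argv
instance (argv : List String) (out : List String) : Decidable (Spec_terms_from_argv_py argv out) := by unfold Spec_terms_from_argv_py; infer_instance

-- ===== CLAIM (what is proved, stated in full; the proofs are below) =====
def Claim_equal_terms_from_argv_py : Prop := ∀ (argv : List String), Dom_terms_from_argv_py argv → Spec_terms_from_argv_py argv (terms_from_argv_py argv)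

-- ===== LEMMAS AND PROOFS =====

-- split₀.go with a non-empty accumulator factors it out in front
theorem pv_go_acc (s cur : List Char) (acc : List (List Char)) :
    PySem.Chars.split₀.go s cur acc = acc.reverse ++ PySem.Chars.split₀.go s cur [] := by
  induction s generalizing cur acc with
  | nil =>
      rw [PySem.Chars.split₀.go, PySem.Chars.split₀.go]
      by_cases h : cur.isEmpty <;> simp [h]
  | cons c rest ih =>
      rw [PySem.Chars.split₀.go, PySem.Chars.split₀.go]
      by_cases hs : PySem.Chars.isspace c
      · by_cases h : cur.isEmpty <;>
          simp [hs, h, ih [] (cur.reverse :: acc), ih ([] : List Char) [cur.reverse], ih ([] : List Char) acc]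
      · simp [hs, ih (c :: cur) acc]

-- splitting across an inserted space concatenates the word lists
theorem pv_split₀_space (a b cur : List Char) :
    PySem.Chars.split₀.go (a ++ ' ' :: b) cur [] =
      PySem.Chars.split₀.go a cur [] ++ PySem.Chars.split₀ b := by
  induction a generalizing cur with
  | nil =>
      rw [List.nil_append, PySem.Chars.split₀.go, PySem.Chars.split₀.go]
      have hsp : PySem.Chars.isspace ' ' = true := by decide
      by_cases h : cur.isEmpty <;>
        simp [hsp, h, PySem.Chars.split₀, pv_go_acc b [] [cur.reverse]]
  | cons c rest ih =>
      rw [List.cons_append, PySem.Chars.split₀.go, PySem.Chars.split₀.go]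
      by_cases hs : PySem.Chars.isspace c
      · by_cases h : cur.isEmpty <;>
          simp [hs, h, ih, pv_go_acc rest [] [cur.reverse],
            pv_go_acc (rest ++ ' ' :: b) [] [cur.reverse]]
      · simp [hs, ih]

theorem pv_intercalate_cons_cons (sep x y : List Char) (ys : List (List Char)) :
    List.intercalate sep (x :: y :: ys) = x ++ sep ++ List.intercalate sep (y :: ys) := by
  simp [List.intercalate, List.intersperse]

theorem pv_split₀_intercalate (l : List (List Char)) :
    PySem.Chars.split₀ (List.intercalate [' '] l) = l.flatMap PySem.Chars.split₀ := by
  induction l with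
  | nil => simp [List.intercalate, PySem.Chars.split₀]; rw [PySem.Chars.split₀.go]; simp
  | cons x xs ih =>
      cases xs with
      | nil => simp [List.intercalate]
      | cons y ys =>
          rw [pv_intercalate_cons_cons, List.append_assoc, List.singleton_append]
          simp only [PySem.Chars.split₀]
          rw [pv_split₀_space]
          simp only [PySem.Chars.split₀] at ih ⊢
          rw [ih]
          simp [PySem.Chars.split₀]

-- every word produced by split₀ is non-empty and whitespace-free
theorem pv_go_words (s cur : List Char) (acc : List (List Char))
    (hcur : ∀ c ∈ cur, PySem.Chars.isspace c = false)
    (hacc : ∀ w ∈ acc, w ≠ [] ∧ ∀ c ∈ w, PySem.Chars.isspace c = false) :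
    ∀ w ∈ PySem.Chars.split₀.go s cur acc, w ≠ [] ∧ ∀ c ∈ w, PySem.Chars.isspace c = false := by
  induction s generalizing cur acc with
  | nil =>
      rw [PySem.Chars.split₀.go]
      by_cases h : cur.isEmpty
      · simpa [h] using fun w hw => hacc w hw
      · intro w hw
        simp [h] at hw
        rcases hw with hw | hw
        · exact hacc w hw
        · subst hw
          refine ⟨by simpa [List.isEmpty_iff] using h, fun c hc => hcur c (by simpa using hc)⟩
  | cons c rest ih =>
      rw [PySem.Chars.split₀.go]
      by_cases hs : PySem.Chars.isspace c
      · by_cases h : cur.isEmpty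
        · simp only [hs, h, if_true]
          exact ih [] acc (by simp) hacc
        · simp only [hs, h, if_true, Bool.false_eq_true, if_false]
          refine ih [] (cur.reverse :: acc) (by simp) ?_
          intro w hw
          rcases List.mem_cons.mp hw with hw | hw
          · subst hw
            exact ⟨by simpa [List.isEmpty_iff] using h, fun d hd => hcur d (by simpa using hd)⟩
          · exact hacc w hw
      · simp only [hs, Bool.false_eq_true, if_false]
        refine ih (c :: cur) acc ?_ hacc
        intro d hd
        rcases List.mem_cons.mp hd with hd | hd
        · subst hd; simpa using hs
        · exact hcur d hd

theorem pv_split₀_words (s : List Char) :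
    ∀ w ∈ PySem.Chars.split₀ s, w ≠ [] ∧ ∀ c ∈ w, PySem.Chars.isspace c = false :=
  pv_go_words s [] [] (by simp) (by simp)

theorem pv_dropWhile_id (p : Char → Bool) (w : List Char) (h : ∀ c ∈ w, p c = false) :
    List.dropWhile p w = w := by
  cases w with
  | nil => rfl
  | cons c t => simp [h c (by simp)]

-- stripping a whitespace-free word is the identity
theorem pv_strip_id (w : List Char) (h : ∀ c ∈ w, PySem.Chars.isspace c = false) :
    PySem.Chars.strip w = w := by
  unfold PySem.Chars.strip PySem.Chars.lstrip PySem.Chars.rstrip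
  rw [pv_dropWhile_id _ _ h, pv_dropWhile_id _ _ (fun c hc => h c (List.mem_reverse.mp hc)),
    List.reverse_reverse]

-- a fold over already-clean words just appends them
theorem pv_inner_list (l : List String) (hl : ∀ p ∈ l, PySem.Str.strip p = p ∧ p ≠ "")
    (t0 : List String) :
    l.foldl (fun terms part =>
      let p := PySem.Str.strip part
      if p ≠ "" then terms ++ [p] else terms) t0 = t0 ++ l := by
  induction l generalizing t0 with
  | nil => simp
  | cons p ps ih =>
      obtain ⟨h1, h2⟩ := hl p (by simp)
      simp only [List.foldl_cons, h1, if_pos h2]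
      rw [ih (fun q hq => hl q (by simp [hq])) (t0 ++ [p])]
      simp

-- A's inner loop over the words of s just appends them
theorem pv_inner (s : String) (t0 : List String) :
    (PySem.Str.split₀ s).foldl (fun terms part =>
      let p := PySem.Str.strip part
      if p ≠ "" then terms ++ [p] else terms) t0 = t0 ++ PySem.Str.split₀ s := by
  refine pv_inner_list _ ?_ t0
  intro part hp
  have hmem : part.toList ∈ PySem.Chars.split₀ s.toList := by
    rw [← PySem.Str.split₀_map_toList]
    exact List.mem_map_of_mem hp
  obtain ⟨hne, hws⟩ := pv_split₀_words s.toList part.toList hmem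
  refine ⟨?_, ?_⟩
  · unfold PySem.Str.strip
    rw [pv_strip_id _ hws]
    exact String.ofList_toList
  · intro h; subst h; simp at hne

theorem pv_A_flatMap (argv : List String) (t0 : List String) :
    argv.foldl (fun terms a =>
      (PySem.Str.split₀ (if a == "" then "" else a)).foldl (fun terms part =>
        let p := PySem.Str.strip part
        if p ≠ "" then terms ++ [p] else terms) terms) t0
      = t0 ++ argv.flatMap PySem.Str.split₀ := by
  induction argv generalizing t0 with
  | nil => simp
  | cons a rest ih =>
      have hif : PySem.Str.split₀ (if a == "" then "" else a) = PySem.Str.split₀ a := by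
        by_cases h : a = "" <;> simp [h]
      rw [List.foldl_cons, pv_inner, hif, ih, List.flatMap_cons, List.append_assoc]

theorem pv_B_flatMap (argv : List String) :
    terms_from_argv_py_alt argv = argv.flatMap PySem.Str.split₀ := by
  unfold terms_from_argv_py_alt PySem.Str.split₀
  rw [PySem.Str.toList_join]
  have hsp : (" " : String).toList = [' '] := by decide
  rw [PySem.Chars.join, hsp, pv_split₀_intercalate, List.map_flatMap, List.flatMap_map]

-- ===== VERDICT (by name: the statement is the Claim_ definition above) =====
theorem terms_from_argv_py_spec : Claim_equal_terms_from_argv_py := by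
  intro argv _
  show terms_from_argv_py argv = terms_from_argv_py_alt argv
  rw [pv_B_flatMap]
  exact pv_A_flatMap argv []
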